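-- pv_equiv track=rewrite | github.com/c-bun/CC3.5 | CC3.5.py | sets_are_nodes3
-- ===== SOURCE A (Python) =====
-- def sets_are_nodes3(setlist):
--     edgeList = []
--     nodeList = []
--     for member in setlist:
--         edgeList.append(tuple(sorted([member[1],member[2],member[4],member[5]])))
--         nodeList.append((member[1],member[2]))
--         nodeList.append((member[4],member[5]))
--     result1 = result2 = False
--     if len(set(edgeList)) == len(setlist):
--         result1 = True
--     if len(set(nodeList)) == len(setlist):
--         result2 = True
--     return result1 and result2
-- ===== SOURCE B (Python) =====
-- def sets_are_nodes3(setlist):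
--     edges = [tuple(sorted((m[1], m[2], m[4], m[5]))) for m in setlist]
--     nodes = [(m[1], m[2]) for m in setlist] + [(m[4], m[5]) for m in setlist]
--     uniq_edges = sum(1 for i, e in enumerate(edges) if e not in edges[:i])
--     uniq_nodes = sum(1 for i, p in enumerate(nodes) if p not in nodes[:i])
--     return uniq_edges == len(setlist) and uniq_nodes == len(setlist)
-- ===== Notes on version B (the rewrite author's own statement) =====
-- stated objective: alternative
-- what changed: Replaces A's hash-set cardinality tests by set-free first-occurrence counting: B builds the edge and node lists by staged comprehensions and counts, via a quadratic prefix-membership scan (e not in edges[:i]), how many elements are first occurrences, comparing both counts to len(setlist).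
import Mathlib
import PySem

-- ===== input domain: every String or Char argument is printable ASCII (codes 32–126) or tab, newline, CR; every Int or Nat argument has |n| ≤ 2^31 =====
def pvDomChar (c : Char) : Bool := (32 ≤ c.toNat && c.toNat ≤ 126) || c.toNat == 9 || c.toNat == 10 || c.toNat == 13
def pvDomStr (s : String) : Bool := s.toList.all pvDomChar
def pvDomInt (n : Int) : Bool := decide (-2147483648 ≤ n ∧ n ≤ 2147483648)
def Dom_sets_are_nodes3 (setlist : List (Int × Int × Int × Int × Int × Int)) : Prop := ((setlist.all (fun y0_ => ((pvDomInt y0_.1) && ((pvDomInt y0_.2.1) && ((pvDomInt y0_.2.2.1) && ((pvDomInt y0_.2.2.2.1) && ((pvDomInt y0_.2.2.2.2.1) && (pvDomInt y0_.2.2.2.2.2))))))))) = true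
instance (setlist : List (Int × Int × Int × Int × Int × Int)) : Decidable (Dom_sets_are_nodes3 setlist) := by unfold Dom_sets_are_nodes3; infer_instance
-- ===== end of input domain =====

-- B replaces A's set()-cardinality tests by set-free first-occurrence counting with a
-- quadratic prefix-membership scan (alternative decomposition, not faster).

-- tuple(sorted([member[1], member[2], member[4], member[5]])); the Python tuple of 4 ints is
-- modelled as the sorted 4-element list itself (tuple equality = componentwise = list equality).
def pvEdge (m : Int × Int × Int × Int × Int × Int) : List Int :=
  PySem.List.sorted [m.2.1, m.2.2.1, m.2.2.2.2.1, m.2.2.2.2.2] (fun x => x) false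

-- ===== PORT A =====
def sets_are_nodes3 (setlist : List (Int × Int × Int × Int × Int × Int)) : Bool :=
  -- the loop appends to edgeList and twice to nodeList
  let st := setlist.foldl
    (fun (st : List (List Int) × List (Int × Int)) m =>
      (st.1 ++ [pvEdge m], st.2 ++ [(m.2.1, m.2.2.1), (m.2.2.2.2.1, m.2.2.2.2.2)]))
    ([], [])
  let result1 := PySem.Set.len (PySem.Set.ofList st.1) == (setlist.length : Int)
  let result2 := PySem.Set.len (PySem.Set.ofList st.2) == (setlist.length : Int)
  result1 && result2

-- ===== PORT B =====
def sets_are_nodes3_alt (setlist : List (Int × Int × Int × Int × Int × Int)) : Bool :=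
  let edges := setlist.map pvEdge
  let nodes := setlist.map (fun m => (m.2.1, m.2.2.1))
               ++ setlist.map (fun m => (m.2.2.2.2.1, m.2.2.2.2.2))
  -- sum(1 for i, e in enumerate(edges) if e not in edges[:i]) as a countP (0/1-sum)
  let uniqEdges : Int :=
    ((PySem.List.enumerate edges 0).countP
      (fun ie => !(PySem.List.slice edges none (some ie.1)).contains ie.2) : Nat)
  let uniqNodes : Int :=
    ((PySem.List.enumerate nodes 0).countP
      (fun ie => !(PySem.List.slice nodes none (some ie.1)).contains ie.2) : Nat)
  uniqEdges == (setlist.length : Int) && uniqNodes == (setlist.length : Int)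

-- ===== PRECONDITION & SPEC =====
def Spec_sets_are_nodes3 (setlist : List (Int × Int × Int × Int × Int × Int)) (out : Bool) : Prop := out = sets_are_nodes3_alt setlist
instance (setlist : List (Int × Int × Int × Int × Int × Int)) (out : Bool) : Decidable (Spec_sets_are_nodes3 setlist out) := by unfold Spec_sets_are_nodes3; infer_instance

-- ===== CLAIM (what is proved, stated in full; the proofs are below) =====
def Claim_equal_sets_are_nodes3 : Prop := ∀ (setlist : List (Int × Int × Int × Int × Int × Int)), Dom_sets_are_nodes3 setlist → Spec_sets_are_nodes3 setlist (sets_are_nodes3 setlist)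

-- ===== LEMMAS AND PROOFS =====

-- first-occurrence counting over a prefix: the generalized loop invariant
theorem pv_firstOcc_count {α : Type} [BEq α] [LawfulBEq α] [DecidableEq α] (xs pre : List α) :
    ((PySem.List.enumerate xs (pre.length : Int)).countP
        (fun ie => !(PySem.List.slice (pre ++ xs) none (some ie.1)).contains ie.2)) +
      (PySem.Set.ofList pre).length
      = (PySem.Set.ofList (pre ++ xs)).length := by
  induction xs generalizing pre with
  | nil => simp [PySem.List.enumerate_nil]
  | cons a t ih =>
    rw [PySem.List.enumerate_cons, List.countP_cons]
    have hslice : PySem.List.slice (pre ++ a :: t) none (some (pre.length : Int)) = pre := by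
      rw [PySem.List.slice_to_natCast]
      simp
    have hassoc : pre ++ a :: t = (pre ++ [a]) ++ t := by simp
    have hlen : (pre.length : Int) + 1 = ((pre ++ [a]).length : Int) := by
      simp [List.length_append]
    have hisA : (PySem.Set.ofList (pre ++ [a])).length
        = (PySem.Set.ofList pre).length + (if a ∈ pre then 0 else 1) := by
      rw [PySem.Set.ofList_append_singleton]
      unfold PySem.Set.add
      by_cases h : a ∈ pre
      · simp [PySem.Set.contains, PySem.Set.mem_ofList, h]
      · simp [PySem.Set.contains, PySem.Set.mem_ofList, h]
    have := ih (pre ++ [a])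
    simp only [hslice]
    rw [hassoc, hlen]
    rw [← this, hisA]
    by_cases h : a ∈ pre <;> simp [h]
    omega

-- first-occurrence count of the whole list = |set(xs)|
theorem pv_firstOcc_count_nil {α : Type} [BEq α] [LawfulBEq α] [DecidableEq α] (xs : List α) :
    ((PySem.List.enumerate xs 0).countP
        (fun ie => !(PySem.List.slice xs none (some ie.1)).contains ie.2))
      = (PySem.Set.ofList xs).length := by
  have := pv_firstOcc_count xs []
  simpa using this

-- |set(xs)| only depends on the elements of xs (as a finite set)
theorem pv_len_ofList_eq_card {α : Type} [BEq α] [LawfulBEq α] [DecidableEq α] (xs : List α) :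
    (PySem.Set.ofList xs).length = xs.toFinset.card := by
  have hnd := PySem.Set.nodup_ofList (xs := xs)
  have hmem : (PySem.Set.ofList xs).toFinset = xs.toFinset := by
    apply Finset.ext
    intro y
    simp [PySem.Set.mem_ofList]
  rw [← hmem, List.card_toFinset, hnd.dedup]

-- A's interleaved node list and B's concatenated node list have the same element set
theorem pv_nodes_toFinset (setlist : List (Int × Int × Int × Int × Int × Int)) :
    (setlist.flatMap (fun m => [(m.2.1, m.2.2.1), (m.2.2.2.2.1, m.2.2.2.2.2)])).toFinset
      = (setlist.map (fun m => (m.2.1, m.2.2.1))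
          ++ setlist.map (fun m => (m.2.2.2.2.1, m.2.2.2.2.2))).toFinset := by
  apply Finset.ext
  intro y
  simp only [List.mem_toFinset, List.mem_flatMap, List.mem_append, List.mem_map,
    List.mem_cons, List.not_mem_nil, or_false]
  constructor
  · rintro ⟨m, hm, h | h⟩
    · exact Or.inl ⟨m, hm, h.symm⟩
    · exact Or.inr ⟨m, hm, h.symm⟩
  · rintro (⟨m, hm, h⟩ | ⟨m, hm, h⟩)
    · exact ⟨m, hm, Or.inl h.symm⟩
    · exact ⟨m, hm, Or.inr h.symm⟩

-- ===== VERDICT (by name: the statement is the Claim_ definition above) =====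
theorem sets_are_nodes3_spec : Claim_equal_sets_are_nodes3 := by
  intro setlist _
  unfold Spec_sets_are_nodes3 sets_are_nodes3 sets_are_nodes3_alt
  rw [PySem.List.foldl_prod_mk (f := fun acc m => acc ++ [pvEdge m])
      (g := fun acc m => acc ++ [(m.2.1, m.2.2.1), (m.2.2.2.2.1, m.2.2.2.2.2)])]
  simp only [PySem.List.foldl_append_singleton_eq_map, PySem.List.foldl_append_eq_flatMap,
    List.nil_append]
  rw [pv_firstOcc_count_nil, pv_firstOcc_count_nil]
  simp only [PySem.Set.len]
  have hN : (PySem.Set.ofList (setlist.flatMap (fun m => [(m.2.1, m.2.2.1), (m.2.2.2.2.1, m.2.2.2.2.2)]))).length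
      = (PySem.Set.ofList (setlist.map (fun m => (m.2.1, m.2.2.1))
          ++ setlist.map (fun m => (m.2.2.2.2.1, m.2.2.2.2.2)))).length := by
    rw [pv_len_ofList_eq_card, pv_len_ofList_eq_card, pv_nodes_toFinset]
  rw [hN]
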